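-- pv_equiv track=rewrite | github.com/tylersmed/cs313 | Assingments/Cipher.py | crt_padded_enc
-- ===== SOURCE A (Python) =====
-- import math
--
-- def crt_padded_enc(strng):
--     # creates a version of the string to be encoded as a padded message
--     sqr_len = math.ceil(math.sqrt(len(strng)))
--     paddded_msg = [['*' for x in range(sqr_len)] for i in range(sqr_len)]
--     chr_lst = list(strng)
--
--     for row in range(sqr_len):
--         # replaces '*'s with chars from the string in a right to left,
--         # top to bottom direction
--         for col in range(sqr_len):
--             if not chr_lst:
--                 break
--             else:
--                 paddded_msg[row][col] = chr_lst.pop(0)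
--
--     return paddded_msg
-- ===== SOURCE B (Python) =====
-- import math
--
-- def crt_padded_enc(strng):
--     # pad the string to a full square, then slice it into rows
--     sqr_len = math.ceil(math.sqrt(len(strng)))
--     padded = strng + '*' * (sqr_len * sqr_len - len(strng))
--     return [list(padded[i * sqr_len:(i + 1) * sqr_len]) for i in range(sqr_len)]
-- ===== Notes on version B (the rewrite author's own statement) =====
-- stated objective: faster
-- what changed: Replaces the star-prefilled nested grid, the nested row/col loops and the break-on-exhaustion pop(0) logic with a single padding concatenation followed by slicing the padded string into sqr_len chunks of length sqr_len.
import Mathlib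
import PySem

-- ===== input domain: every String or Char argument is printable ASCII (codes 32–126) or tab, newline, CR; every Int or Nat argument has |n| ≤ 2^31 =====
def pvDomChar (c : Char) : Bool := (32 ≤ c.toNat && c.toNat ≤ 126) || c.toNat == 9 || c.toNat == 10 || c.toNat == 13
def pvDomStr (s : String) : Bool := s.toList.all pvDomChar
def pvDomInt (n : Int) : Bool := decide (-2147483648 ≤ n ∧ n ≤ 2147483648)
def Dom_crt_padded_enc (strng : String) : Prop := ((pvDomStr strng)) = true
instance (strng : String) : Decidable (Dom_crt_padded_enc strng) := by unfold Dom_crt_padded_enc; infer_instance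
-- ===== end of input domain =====

-- B replaces A's star-prefilled grid, nested cell loop and pop(0) with a single pad-then-chunk pass (a timing run measured it faster).

-- ===== PORT A =====
-- math.ceil(math.sqrt(len(strng))): exact on Nat (least s with n ≤ s*s); used by both Pythons
def pvCeilSqrt (n : Nat) : Nat :=
  if Nat.sqrt n * Nat.sqrt n == n then Nat.sqrt n else Nat.sqrt n + 1

-- A's inner 'for col in range(sqr_len)' loop, with its break when chr_lst is exhausted
-- (the break leaves chr_lst as is; it is [] there, so (grid, []) is exactly Python's state)
def pvInnerA (row : Nat) (cols : List Nat) (grid : List (List String)) (chrs : List Char) :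
    List (List String) × List Char :=
  match cols, chrs with
  | [], _ => (grid, chrs)
  | _ :: _, [] => (grid, [])
  | c :: rest, ch :: tl =>
      pvInnerA row rest (grid.set row ((grid.getD row []).set c (String.singleton ch))) tl

-- A's outer 'for row in range(sqr_len)' loop over the state (paddded_msg, chr_lst)
def pvOuterA (s : Nat) (rows : List Nat) (grid : List (List String)) (chrs : List Char) :
    List (List String) × List Char :=
  match rows with
  | [] => (grid, chrs)
  | r :: rest =>
      let p := pvInnerA r (List.range s) grid chrs
      pvOuterA s rest p.1 p.2

def crt_padded_enc (strng : String) : List (List String) :=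
  let sqr_len := pvCeilSqrt strng.toList.length
  let grid0 := List.replicate sqr_len (List.replicate sqr_len "*")
  (pvOuterA sqr_len (List.range sqr_len) grid0 strng.toList).1

-- ===== PORT B =====
-- Source B: pad the string to a full square with '*', then slice it into sqr_len rows
def crt_padded_enc_alt (strng : String) : List (List String) :=
  let sqr_len := pvCeilSqrt strng.toList.length
  let padded := strng.toList ++ List.replicate (sqr_len * sqr_len - strng.toList.length) '*'
  (List.range sqr_len).map (fun i =>
    (PySem.List.slice padded (some ((i * sqr_len : Nat) : Int))
        (some (((i + 1) * sqr_len : Nat) : Int))).map (fun c => String.singleton c))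

-- ===== PRECONDITION & SPEC =====
def Spec_crt_padded_enc (strng : String) (out : List (List String)) : Prop := out = crt_padded_enc_alt strng
instance (strng : String) (out : List (List String)) : Decidable (Spec_crt_padded_enc strng out) := by unfold Spec_crt_padded_enc; infer_instance

-- ===== CLAIM (what is proved, stated in full; the proofs are below) =====
def Claim_equal_crt_padded_enc : Prop := ∀ (strng : String), Dom_crt_padded_enc strng → Spec_crt_padded_enc strng (crt_padded_enc strng)

-- ===== LEMMAS AND PROOFS =====

lemma pvCeilSqrt_le (n : Nat) : n ≤ pvCeilSqrt n * pvCeilSqrt n := by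
  unfold pvCeilSqrt
  split
  · next h => simp only [beq_iff_eq] at h; omega
  · exact le_of_lt (Nat.lt_succ_sqrt n)

-- A's inner loop acting on one row only (proof helper)
def pvRow (cols : List Nat) (row : List String) (chrs : List Char) : List String × List Char :=
  match cols, chrs with
  | [], _ => (row, chrs)
  | _ :: _, [] => (row, [])
  | c :: rest, ch :: tl => pvRow rest (row.set c (String.singleton ch)) tl

-- row k of B's result
def pvTRow (chars : List Char) (s k : Nat) : List String :=
  (((chars ++ List.replicate (s * s - chars.length) '*').drop (k * s)).take s).map
    (fun c => String.singleton c)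

lemma pvInnerA_eq_pvRow (cols : List Nat) (r : Nat) :
    ∀ (grid : List (List String)) (chrs : List Char), r < grid.length →
    pvInnerA r cols grid chrs =
      (grid.set r (pvRow cols (grid.getD r []) chrs).1, (pvRow cols (grid.getD r []) chrs).2) := by
  induction cols with
  | nil =>
      intro grid chrs hr
      simp [pvInnerA, pvRow, List.getElem?_eq_getElem hr, List.set_getElem_self]
  | cons c rest ih =>
      intro grid chrs hr
      cases chrs with
      | nil => simp [pvInnerA, pvRow, List.getElem?_eq_getElem hr, List.set_getElem_self]
      | cons ch tl =>
          have hr' : r < (grid.set r ((grid.getD r []).set c (String.singleton ch))).length := by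
            simpa using hr
          rw [pvInnerA, ih _ _ hr']
          rw [List.getD_eq_getElem _ _ hr', List.getElem_set_self]
          rw [List.getD_eq_getElem _ _ hr]
          simp [pvRow, List.set_set]

lemma pvRow_fill (m : Nat) : ∀ (u : List String) (v : Nat) (chrs : List Char), m ≤ v →
    pvRow (List.range' u.length m) (u ++ List.replicate v "*") chrs =
      (u ++ (chrs.take m).map (fun c => String.singleton c) ++
        List.replicate (v - min m chrs.length) "*", chrs.drop m) := by
  induction m with
  | zero => intro u v chrs h; simp [pvRow]
  | succ m ih =>
      intro u v chrs h
      rw [List.range'_succ]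
      cases chrs with
      | nil => simp [pvRow]
      | cons ch tl =>
        rw [pvRow]
        have hrep : List.replicate v ("*" : String) = "*" :: List.replicate (v - 1) "*" := by
          rw [← List.replicate_succ]
          congr 1
          omega
        rw [List.set_append_right _ _ (le_refl u.length), Nat.sub_self, hrep,
          List.set_cons_zero]
        have hu : u ++ String.singleton ch :: List.replicate (v - 1) "*"
            = (u ++ [String.singleton ch]) ++ List.replicate (v - 1) "*" := by
          simp
        have hl : u.length + 1 = (u ++ [String.singleton ch]).length := by simp
        rw [hu, hl, ih (u ++ [String.singleton ch]) (v - 1) tl (by omega)]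
        simp only [Prod.mk.injEq]
        refine ⟨?_, by simp⟩
        rw [List.take_succ_cons, List.map_cons]
        have hc : min (m + 1) (ch :: tl).length = min m tl.length + 1 := by
          simp [Nat.succ_min_succ]
        rw [hc]
        have hcount : v - 1 - min m tl.length = v - (min m tl.length + 1) := by omega
        rw [hcount]
        simp [List.append_assoc]

lemma pvTRow_eq (chars : List Char) (s k : Nat) (hn : chars.length ≤ s * s) (hk : k < s) :
    pvTRow chars s k =
      ((chars.drop (k * s)).take s).map (fun c => String.singleton c) ++
        List.replicate (s - min s (chars.drop (k * s)).length) "*" := by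
  have hp : k * s + s ≤ s * s := by
    calc k * s + s = (k + 1) * s := by ring
    _ ≤ s * s := Nat.mul_le_mul_right s (by omega)
  unfold pvTRow
  rw [List.drop_append, List.take_append, List.map_append]
  congr 1
  rw [List.drop_replicate, List.take_replicate, List.map_replicate]
  congr 1
  simp only [List.length_drop]
  omega

lemma pvOuterA_inv (chars : List Char) (s : Nat) (hn : chars.length ≤ s * s) :
    ∀ (m k : Nat), k + m = s →
    (pvOuterA s (List.range' k m)
        ((List.range k).map (pvTRow chars s) ++
          List.replicate (s - k) (List.replicate s "*"))
        (chars.drop (k * s))).1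
      = (List.range s).map (pvTRow chars s) := by
  intro m
  induction m with
  | zero =>
      intro k hk
      have : k = s := by omega
      subst this
      simp [pvOuterA]
  | succ m ih =>
      intro k hk
      have hk' : k < s := by omega
      set G : List (List String) :=
        (List.range k).map (pvTRow chars s) ++
          List.replicate (s - k) (List.replicate s "*") with hG
      have hlenA : ((List.range k).map (pvTRow chars s)).length = k := by simp
      have hGlen : G.length = s := by rw [hG]; simp; omega
      have hstep : s - k = (s - k - 1) + 1 := by omega
      have hget : G.getD k [] = List.replicate s "*" := by
        rw [hG, List.getD_append_right _ _ _ _ (le_of_eq hlenA), hlenA]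
        rw [hstep, List.replicate_succ]
        simp
      have hrowfill := pvRow_fill s ([] : List String) s (chars.drop (k * s)) (le_refl s)
      simp only [List.length_nil, List.nil_append] at hrowfill
      have hinner : pvInnerA k (List.range s) G (chars.drop (k * s)) =
          (G.set k (pvTRow chars s k), chars.drop ((k + 1) * s)) := by
        rw [pvInnerA_eq_pvRow _ _ _ _ (by rw [hGlen]; exact hk'), hget, List.range_eq_range',
          hrowfill]
        simp only [Prod.mk.injEq]
        constructor
        · rw [pvTRow_eq chars s k hn hk']
        · rw [List.drop_drop, Nat.add_one_mul]
      have hgrid : G.set k (pvTRow chars s k) =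
          (List.range (k + 1)).map (pvTRow chars s) ++
            List.replicate (s - (k + 1)) (List.replicate s "*") := by
        rw [hG, List.set_append_right _ _ (le_of_eq hlenA), hlenA, Nat.sub_self]
        rw [hstep, List.replicate_succ, List.set_cons_zero]
        rw [List.range_succ, List.map_append]
        simp only [List.map_cons, List.map_nil, List.append_assoc, List.singleton_append]
        congr 2
      rw [List.range'_succ, pvOuterA]
      simp only [hinner, hgrid]
      exact ih (k + 1) (by omega)

-- ===== VERDICT (by name: the statement is the Claim_ definition above) =====
theorem crt_padded_enc_spec : Claim_equal_crt_padded_enc := by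
  intro strng _
  unfold Spec_crt_padded_enc crt_padded_enc crt_padded_enc_alt
  set chars := strng.toList with hc
  set s := pvCeilSqrt chars.length with hs
  have hn : chars.length ≤ s * s := pvCeilSqrt_le chars.length
  have hA : (pvOuterA s (List.range s) (List.replicate s (List.replicate s "*")) chars).1
      = (List.range s).map (pvTRow chars s) := by
    have h0 := pvOuterA_inv chars s hn s 0 (by omega)
    simpa [List.range_eq_range'] using h0
  rw [hA]
  apply List.map_congr_left
  intro i hi
  rw [PySem.List.slice_natCast]
  have hstep : (i + 1) * s - i * s = s := by
    have : (i + 1) * s = i * s + s := by ring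
    omega
  rw [hstep]
  rfl
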